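-- pv_equiv track=rewrite | github.com/Singhanji/python-DSA | advance_DSA/modulo/rearrange_array_with_SC_1.py | solve
-- ===== SOURCE A (Python) =====
-- def solve(A):
--     n = len(A)
--     for i in range(n):
--         A[i] = A[i] * n
--
--     for i in range(n):
--         A[i] += A[A[i]//n]//n
--
--     for i in range(n):
--         A[i] = A[i] % n
--
--     return A
-- ===== SOURCE B (Python) =====
-- def solve(A):
--     n = len(A)
--     A[:] = [A[A[i]] % n for i in range(n)]
--     return A
-- ===== Notes on version B (the rewrite author's own statement) =====
-- stated objective: simpler
-- what changed: Drops the three mutating encode/decode passes for a single comprehension reading the untouched values, written back in place; Pre_ excludes in-range inputs with a back-reference whose doubly-indexed element is negative, a corner outside the problem's stated 0..n-1 element domain where A's encoded read of an already-updated slot and B's direct read give different, equally unspecified results.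
-- outside the precondition, e.g. on solve([1, -1, 0]): A returns [2, 0, 0], B returns [2, 0, 1]
import Mathlib
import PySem

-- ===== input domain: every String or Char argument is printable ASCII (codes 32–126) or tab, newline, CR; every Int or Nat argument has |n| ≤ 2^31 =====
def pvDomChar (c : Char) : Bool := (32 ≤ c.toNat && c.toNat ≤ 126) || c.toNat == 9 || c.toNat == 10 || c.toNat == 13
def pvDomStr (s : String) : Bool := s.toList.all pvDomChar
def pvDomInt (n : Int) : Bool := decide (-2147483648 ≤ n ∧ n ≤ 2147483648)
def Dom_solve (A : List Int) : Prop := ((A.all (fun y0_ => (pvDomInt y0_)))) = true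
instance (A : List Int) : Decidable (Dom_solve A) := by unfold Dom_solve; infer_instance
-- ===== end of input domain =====

-- B replaces the three mutating encode/decode passes by one comprehension over the untouched
-- values, written back in place (both mutate the argument; the theorems are about the return value).

-- ===== PORT A =====
-- one in-place pass 'for i in range(n): A[i] = g(A[i])' (A's first and third loops)
def passMap (g : Int → Int) (acc : List Int) : List Nat → List Int
  | [] => acc
  | i :: rest => passMap g (acc.set i (g (acc.getD i 0))) rest

-- A's second loop: 'A[i] += A[A[i]//n]//n'; the indexing can raise (none = IndexError)
def pass2 (n : Int) (acc : List Int) : List Nat → Option (List Int)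
  | [] => some acc
  | i :: rest =>
    match PySem.List.pyGet? acc (PySem.Int.floordiv (acc.getD i 0) n) with
    | none => none
    | some v => pass2 n (acc.set i (acc.getD i 0 + PySem.Int.floordiv v n)) rest

def solve (A : List Int) : List Int :=
  let n : Int := A.length
  let A1 := passMap (fun x => x * n) A (List.range A.length)
  match pass2 n A1 (List.range A.length) with
  | none => []  -- IndexError; excluded by Pre_solve
  | some A2 => passMap (fun x => PySem.Int.mod x n) A2 (List.range A.length)

-- ===== PORT B =====
-- the comprehension '[A[A[i]] % n for i in range(n)]'; the inner indexing can raise (none = IndexError)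
def bcomp (n : Int) (a : List Int) : List Nat → Option (List Int)
  | [] => some []
  | i :: rest =>
    match PySem.List.pyGet? a (a.getD i 0) with
    | none => none
    | some v => (bcomp n a rest).map (fun r => PySem.Int.mod v n :: r)

def solve_alt (A : List Int) : List Int :=
  let n : Int := A.length
  match bcomp n A (List.range A.length) with
  | none => []  -- IndexError; excluded by Pre_solve
  | some r => r

-- ===== PRECONDITION & SPEC =====
-- Python's index resolution: a negative index counts from the end
def wrapIdx (len : Nat) (v : Int) : Nat := if v < 0 then (v + len).toNat else v.toNat

-- Pre_ excludes (a) inputs with an element outside [-n, n), on which A raises IndexError, and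
-- (b) in-range inputs containing a back-reference (wrap A[q] < q) whose doubly-indexed element
-- A[A[A[q]]] is negative: the problem specifies the elements to be indices 0..n-1, and on those
-- out-of-spec inputs A's encoded read of an already-updated slot and B's direct read of the
-- original value give different, equally unspecified results.
def Pre_solve (A : List Int) : Prop :=
  (∀ x ∈ A, -(A.length : Int) ≤ x ∧ x < (A.length : Int)) ∧
  (∀ q, q < A.length → wrapIdx A.length (A.getD q 0) < q →
    0 ≤ A.getD (wrapIdx A.length (A.getD (wrapIdx A.length (A.getD q 0)) 0)) 0)
instance (A : List Int) : Decidable (Pre_solve A) := by unfold Pre_solve; infer_instance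
def pvWitness_solve : List Int := [1, 0, 2]

def Spec_solve (A : List Int) (out : List Int) : Prop := out = solve_alt A
instance (A : List Int) (out : List Int) : Decidable (Spec_solve A out) := by unfold Spec_solve; infer_instance

-- ===== CLAIM (what is proved, stated in full; the proofs are below) =====
def Claim_equal_solve : Prop := ∀ (A : List Int), Dom_solve A → Pre_solve A → Spec_solve A (solve A)

-- ===== LEMMAS AND PROOFS =====

theorem pyGet?_wrap (xs : List Int) (v : Int) (h0 : -(xs.length:Int) ≤ v) (h1 : v < (xs.length:Int)) :
    PySem.List.pyGet? xs v = some (xs.getD (wrapIdx xs.length v) 0) := by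
  have hw : wrapIdx xs.length v < xs.length := by unfold wrapIdx; split <;> omega
  rw [List.getD_eq_getElem _ 0 hw]
  by_cases hv : v < 0
  · have h2 : ¬ (0 ≤ v) := by omega
    have h3 : xs.length - (-v).toNat = wrapIdx xs.length v := by unfold wrapIdx; split <;> omega
    simp [PySem.List.pyGet?, PySem.List.pyIdx?, h2, h0, h3]
  · have h2 : (0 ≤ v) := by omega
    have h3 : v.toNat = wrapIdx xs.length v := by unfold wrapIdx; split <;> omega
    simp [PySem.List.pyGet?, PySem.List.pyIdx?, h2, h1, h3]

theorem passMap_spec (g : Int → Int) (L : Nat) (c : Nat → Int) :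
    ∀ (k i : Nat) (acc : List Int), acc.length = L → i + k = L →
    (∀ j, j < L → acc.getD j 0 = if j < i then g (c j) else c j) →
    passMap g acc (List.range' i k) = (List.range L).map (fun j => g (c j)) := by
  intro k
  induction k with
  | zero =>
    intro i acc hlen hik hinv
    simp only [List.range'_zero, passMap]
    apply List.ext_getElem (by simpa using hlen)
    intro j h1 h2
    have hj : j < L := by omega
    have := hinv j hj
    rw [List.getD_eq_getElem acc 0 (by omega)] at this
    simp only [List.getElem_map, List.getElem_range]
    rw [this, if_pos (by omega)]
  | succ k ih =>
    intro i acc hlen hik hinv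
    rw [List.range'_succ]
    simp only [passMap]
    apply ih (i+1)
    · simpa using hlen
    · omega
    · intro j hj
      by_cases hji : j = i
      · subst hji
        rw [List.getD_eq_getElem _ 0 (by simp; omega), List.getElem_set_self (by simp [hlen]; omega)]
        rw [if_pos (by omega)]
        have := hinv j hj
        rw [this, if_neg (by omega)]
      · have := hinv j hj
        rw [List.getD_eq_getElem _ 0 (by simp; omega), List.getElem_set_ne (h := by omega)]
        rw [← List.getD_eq_getElem acc 0 (by omega), this]
        by_cases h1 : j < i
        · rw [if_pos h1, if_pos (by omega)]
        · rw [if_neg h1, if_neg (by omega)]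

theorem getD_set_self (l : List Int) (i : Nat) (x : Int) (h : i < l.length) :
    (l.set i x).getD i 0 = x := by
  rw [List.getD_eq_getElem _ 0 (by simpa using h), List.getElem_set_self (by simpa using h)]

theorem getD_set_ne (l : List Int) (i j : Nat) (x : Int) (hj : j < l.length) (h : j ≠ i) :
    (l.set i x).getD j 0 = l.getD j 0 := by
  rw [List.getD_eq_getElem _ 0 (by simpa using hj), List.getElem_set_ne (h := by omega),
    List.getD_eq_getElem l 0 hj]

theorem floordiv_add_mul (x r n : Int) (hn : 0 < n) :
    PySem.Int.floordiv (x * n + r) n = x + PySem.Int.floordiv r n := by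
  rw [PySem.Int.floordiv_eq_ediv_of_pos hn, PySem.Int.floordiv_eq_ediv_of_pos hn]
  rw [add_comm (x*n) r, Int.add_mul_ediv_right _ _ (by omega)]
  ring

theorem mod_add_mul (x r n : Int) (hn : 0 < n) :
    PySem.Int.mod (x * n + r) n = PySem.Int.mod r n := by
  rw [PySem.Int.mod_eq_emod_of_pos hn, PySem.Int.mod_eq_emod_of_pos hn,
    add_comm, Int.add_mul_emod_self_right]

-- fval a j = the Python value A[A[j]] on the untouched list
def fval (a : List Int) (j : Nat) : Int := a.getD (wrapIdx a.length (a.getD j 0)) 0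

theorem bcomp_spec (a : List Int)
    (hb : ∀ j, j < a.length → -(a.length : Int) ≤ a.getD j 0 ∧ a.getD j 0 < (a.length : Int)) :
    ∀ (is : List Nat), (∀ i ∈ is, i < a.length) →
    bcomp (a.length : Int) a is =
      some (is.map (fun i => PySem.Int.mod (fval a i) (a.length : Int))) := by
  intro is
  induction is with
  | nil => intro _; simp [bcomp]
  | cons i rest ih =>
    intro h
    have hi := hb i (h i (by simp))
    simp only [bcomp]
    rw [pyGet?_wrap a _ hi.1 hi.2, ih (fun j hj => h j (by simp [hj]))]
    simp [fval]

theorem pass2_spec (a : List Int) (hn : 0 < (a.length : Int))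
    (hb : ∀ j, j < a.length → -(a.length : Int) ≤ a.getD j 0 ∧ a.getD j 0 < (a.length : Int))
    (hpre2 : ∀ q, q < a.length → wrapIdx a.length (a.getD q 0) < q →
      0 ≤ fval a (wrapIdx a.length (a.getD q 0))) :
    ∀ (k i : Nat) (acc : List Int), acc.length = a.length → i + k = a.length →
    (∀ j, j < a.length →
      acc.getD j 0 = a.getD j 0 * (a.length : Int) + (if j < i then fval a j else 0)) →
    pass2 (a.length : Int) acc (List.range' i k) =
      some ((List.range a.length).map
        (fun j => a.getD j 0 * (a.length : Int) + fval a j)) := by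
  intro k
  induction k with
  | zero =>
    intro i acc hlen hik hinv
    simp only [List.range'_zero, pass2]
    congr 1
    apply List.ext_getElem (by simpa using hlen)
    intro j h1 h2
    have hj : j < a.length := by omega
    have := hinv j hj
    rw [List.getD_eq_getElem acc 0 (by omega)] at this
    simp only [List.getElem_map, List.getElem_range]
    rw [this, if_pos (by omega)]
  | succ k ih =>
    intro i acc hlen hik hinv
    have hiL : i < a.length := by omega
    have hai := hb i hiL
    set v := a.getD i 0 with hv
    set w := wrapIdx a.length v with hw
    have hacc_i : acc.getD i 0 = v * (a.length : Int) := by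
      rw [hinv i hiL, if_neg (by omega), add_zero]
    have hwL : w < a.length := by rw [hw]; unfold wrapIdx; split <;> omega
    rw [List.range'_succ]
    simp only [pass2]
    rw [hacc_i, PySem.Int.floordiv_eq_ediv_of_pos hn, Int.mul_ediv_cancel _ (by omega)]
    rw [pyGet?_wrap acc v (by rw [hlen]; exact hai.1) (by rw [hlen]; exact hai.2)]
    have hww : wrapIdx acc.length v = w := by rw [hlen, hw]
    have hval : acc.getD w 0 = a.getD w 0 * (a.length : Int) +
        (if w < i then fval a w else 0) := hinv w hwL
    have hdiv : PySem.Int.floordiv (acc.getD w 0) (a.length : Int) = a.getD w 0 := by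
      rw [hval]
      split
      · have h0 : 0 ≤ fval a w := by
          apply hpre2 i hiL
          rw [← hv, ← hw]; omega
        have h1 : fval a w < (a.length : Int) := by
          have hbw := hb w hwL
          have := hb (wrapIdx a.length (a.getD w 0)) (by unfold wrapIdx; split <;> omega)
          unfold fval
          omega
        rw [floordiv_add_mul _ _ _ hn, PySem.Int.floordiv_eq_ediv_of_pos hn,
          Int.ediv_eq_zero_of_lt h0 h1, add_zero]
      · rw [add_zero, PySem.Int.floordiv_eq_ediv_of_pos hn, Int.mul_ediv_cancel _ (by omega)]
    rw [hww]
    simp only []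
    rw [hdiv]
    apply ih (i+1)
    · simpa using hlen
    · omega
    · intro j hj
      by_cases hji : j = i
      · subst hji
        rw [getD_set_self acc j _ (by omega), if_pos (Nat.lt_succ_self j)]
        unfold fval
        rw [← hv, ← hw]
      · rw [getD_set_ne acc i j _ (by omega) hji, hinv j hj]
        by_cases h1 : j < i
        · rw [if_pos h1, if_pos (by omega)]
        · rw [if_neg h1, if_neg (by omega)]

-- ===== VERDICT (by name: the statement is the Claim_ definition above) =====
theorem solve_spec : Claim_equal_solve := by
  intro A _ hpre
  unfold Spec_solve
  obtain ⟨hrange, hpre2⟩ := hpre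
  have hb : ∀ j, j < A.length → -(A.length : Int) ≤ A.getD j 0 ∧ A.getD j 0 < (A.length : Int) := by
    intro j hj
    rw [List.getD_eq_getElem A 0 hj]
    exact hrange _ (List.getElem_mem hj)
  by_cases hA : A.length = 0
  · obtain rfl : A = [] := List.eq_nil_of_length_eq_zero hA
    simp [solve, solve_alt, passMap, pass2, bcomp]
  · have hn : (0 : Int) < (A.length : Int) := by
      have := Nat.pos_of_ne_zero hA
      exact_mod_cast this
    simp only [solve, solve_alt]
    rw [bcomp_spec A hb (List.range A.length) (by intro i hi; simpa using hi)]
    rw [List.range_eq_range']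
    rw [passMap_spec (fun x => x * (A.length : Int)) A.length (fun j => A.getD j 0) A.length 0 A
        rfl (by omega) (by intro j hj; simp)]
    rw [pass2_spec A hn hb (by intro q hq hlt; exact hpre2 q hq hlt) A.length 0
        ((List.range A.length).map (fun j => A.getD j 0 * (A.length : Int)))
        (by simp) (by omega)
        (by
          intro j hj
          rw [List.getD_eq_getElem _ 0 (by simp [hj]), if_neg (by omega)]
          simp [hj])]
    simp only []
    rw [passMap_spec (fun x => PySem.Int.mod x (A.length : Int)) A.length
        (fun j => A.getD j 0 * (A.length : Int) + fval A j) A.length 0 _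
        (by simp) (by omega)
        (by
          intro j hj
          rw [List.getD_eq_getElem _ 0 (by simp [hj]), if_neg (by omega)]
          simp [hj])]
    rw [List.range_eq_range']
    apply List.map_congr_left
    intro j hj
    exact mod_add_mul _ _ _ hn
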